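-- pv_equiv track=rewrite | github.com/anatolegosset/Project_Euler | problems/p132_large_repunit_factors.py | _repunit_modulus
-- ===== SOURCE A (Python) =====
-- def _repunit_modulus(repunit, n):
--     if n % 2 == 0 or n % 5 == 0:
--         return 1
--     remainders = []
--     remainder = 1
--     flag = True
--     while flag:
--         remainders.append(remainder)
--         remainder = (remainder * 10) % n
--         if remainder == 1:
--             flag = False
--     q, r = repunit // len(remainders), repunit % len(remainders)
--     return (sum(remainders) * q + sum(remainders[:r])) % n
-- ===== SOURCE B (Python) =====
-- def _repunit_modulus(repunit, n):
--     if n % 2 == 0 or n % 5 == 0: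
--         return 1
--
--     def geo(k):
--         # returns (repunit(k) % n, 10**k % n) by logarithmic doubling
--         if k == 0:
--             return 0, 1 % n
--         s, p = geo(k // 2)
--         s = s * (p + 1) % n
--         p = p * p % n
--         if k % 2 == 1:
--             s = (s * 10 + 1) % n
--             p = p * 10 % n
--         return s, p
--
--     return geo(repunit)[0]
-- ===== Notes on version B (the rewrite author's own statement) =====
-- stated objective: faster
-- what changed: Replaces the O(order(10,n)) loop that materialises the whole cycle of powers of 10 mod n by a divide-and-conquer doubling recurrence on the digit count that computes the geometric sum 1+10+...+10^(k-1) mod n in O(log repunit) steps.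
-- outside the precondition, e.g. on _repunit_modulus(-3, 3): A returns 0, B raises RecursionError; on _repunit_modulus(5, 1): A does not finish within the time limit, B returns 0
import Mathlib
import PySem

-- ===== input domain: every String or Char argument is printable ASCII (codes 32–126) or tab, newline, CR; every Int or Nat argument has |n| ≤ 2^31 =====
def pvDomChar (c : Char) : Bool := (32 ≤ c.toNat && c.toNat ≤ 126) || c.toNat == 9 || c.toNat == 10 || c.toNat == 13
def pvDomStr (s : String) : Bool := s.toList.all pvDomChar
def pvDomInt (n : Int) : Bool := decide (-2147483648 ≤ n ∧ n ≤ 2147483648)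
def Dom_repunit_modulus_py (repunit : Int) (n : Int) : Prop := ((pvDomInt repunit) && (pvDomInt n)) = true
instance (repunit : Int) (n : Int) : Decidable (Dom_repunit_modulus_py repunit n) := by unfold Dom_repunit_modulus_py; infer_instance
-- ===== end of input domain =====

-- B replaces A's O(order(10,n)) cycle-collecting loop by an O(log repunit) doubling recurrence
-- for the geometric sum 1 + 10 + … + 10^(repunit-1) mod n; return values agree on Pre_.

-- ===== PORT A =====
-- the while-loop of A: appends `remainder`, updates it, stops when it returns to 1.
-- Fuel n.toNat: under Pre_ the cycle closes after at most totient(n) < n steps (proved below),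
-- so the fuel-0 branch is never reached on admitted inputs.
def pvLoopA (n : Int) : Nat → Int → List Int → List Int
  | 0, _, remainders => remainders
  | fuel + 1, remainder, remainders =>
    let remainders' := remainders ++ [remainder]
    let remainder' := PySem.Int.mod (remainder * 10) n
    if remainder' = 1 then remainders' else pvLoopA n fuel remainder' remainders'

def repunit_modulus_py (repunit : Int) (n : Int) : Int :=
  if PySem.Int.mod n 2 = 0 ∨ PySem.Int.mod n 5 = 0 then 1
  else
    let remainders := pvLoopA n n.toNat 1 []
    let q := PySem.Int.floordiv repunit (remainders.length : Int)
    let r := PySem.Int.mod repunit (remainders.length : Int)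
    PySem.Int.mod (remainders.sum * q + (PySem.List.slice remainders none (some r)).sum) n

-- ===== PORT B =====
-- geo(k) = (repunit(k) % n, 10^k % n) by doubling on k // 2.
-- Python tests `k == 0`; the guard `k ≤ 0` additionally makes the recursion total
-- (Python's geo does not terminate for k < 0; such inputs are outside Pre_).
def pvGeoB (n : Int) (k : Int) : Int × Int :=
  if k ≤ 0 then (0, PySem.Int.mod 1 n)
  else
    let sp := pvGeoB n (PySem.Int.floordiv k 2)
    let s := PySem.Int.mod (sp.1 * (sp.2 + 1)) n
    let p := PySem.Int.mod (sp.2 * sp.2) n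
    if PySem.Int.mod k 2 = 1 then
      (PySem.Int.mod (s * 10 + 1) n, PySem.Int.mod (p * 10) n)
    else
      (s, p)
termination_by k.toNat
decreasing_by
  rw [PySem.Int.floordiv_eq_ediv_of_pos (by norm_num)]
  omega

def repunit_modulus_py_alt (repunit : Int) (n : Int) : Int :=
  if PySem.Int.mod n 2 = 0 ∨ PySem.Int.mod n 5 = 0 then 1
  else (pvGeoB n repunit).1

-- ===== PRECONDITION & SPEC =====
-- Pre_ excludes inputs in the non-trivial branch (n odd, not divisible by 5) with n ≤ 1,
-- where A's while-loop never terminates, and with repunit < 0, where A's value is an accident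
-- of its floor-division bookkeeping and B's recursion does not terminate (RecursionError).
def Pre_repunit_modulus_py (repunit : Int) (n : Int) : Prop :=
  n % 2 = 0 ∨ n % 5 = 0 ∨ (2 ≤ n ∧ 0 ≤ repunit)
instance (repunit : Int) (n : Int) : Decidable (Pre_repunit_modulus_py repunit n) := by
  unfold Pre_repunit_modulus_py; infer_instance

def pvWitness_repunit_modulus_py : Int × Int := (11, 7)

def Spec_repunit_modulus_py (repunit : Int) (n : Int) (out : Int) : Prop :=
  out = repunit_modulus_py_alt repunit n
instance (repunit : Int) (n : Int) (out : Int) : Decidable (Spec_repunit_modulus_py repunit n out) := by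
  unfold Spec_repunit_modulus_py; infer_instance

-- ===== CLAIM (what is proved, stated in full; the proofs are below) =====
def Claim_equal_repunit_modulus_py : Prop := ∀ (repunit : Int) (n : Int), Dom_repunit_modulus_py repunit n → Pre_repunit_modulus_py repunit n → Spec_repunit_modulus_py repunit n (repunit_modulus_py repunit n)

-- ===== LEMMAS AND PROOFS =====

-- the exact repunit value with k ones, 10-adic: Srep 0 = 0, Srep (m+1) = 10 * Srep m + 1
def Srep : Nat → Int
  | 0 => 0
  | m + 1 => 10 * Srep m + 1

lemma Srep_add (a b : Nat) : Srep (a + b) = 10 ^ b * Srep a + Srep b := by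
  induction b with
  | zero => simp [Srep]
  | succ b ih =>
    show Srep (a + b + 1) = _
    rw [Srep, ih]
    show _ = 10 ^ (b + 1) * Srep a + (10 * Srep b + 1)
    ring

lemma Srep_succ_right (m : Nat) : Srep (m + 1) = Srep m + 10 ^ m := by
  have := Srep_add 1 m
  simp [Srep] at this
  rw [show m + 1 = 1 + m by omega, this]; ring

lemma Srep_eq_sum (m : Nat) : Srep m = ((List.range m).map (fun j => (10:Int) ^ j)).sum := by
  induction m with
  | zero => simp [Srep]
  | succ m ih => rw [Srep_succ_right, List.range_succ]; simp [ih]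

lemma modeq_emod (a n : Int) : a % n ≡ a [ZMOD n] := Int.emod_emod_of_dvd a dvd_rfl

-- pvGeoB computes (Srep k % n, 10^k % n)
lemma pvGeoB_spec (n : Int) (hn : 2 ≤ n) :
    ∀ (m : Nat) (k : Int), 0 ≤ k → k.toNat = m →
      pvGeoB n k = (Srep m % n, (10:Int) ^ m % n) := by
  intro m
  induction m using Nat.strong_induction_on with
  | _ m ih =>
    intro k hk hkm
    have mn : ∀ x : Int, PySem.Int.mod x n = x % n :=
      fun x => PySem.Int.mod_eq_emod_of_pos (by omega)
    rw [pvGeoB]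
    by_cases hk0 : k ≤ 0
    · have hke : k = 0 := le_antisymm hk0 hk
      subst hke
      simp only [Int.toNat_zero] at hkm
      subst hkm
      simp [Srep, mn]
    · rw [if_neg hk0]
      have hfd : PySem.Int.floordiv k 2 = k / 2 :=
        PySem.Int.floordiv_eq_ediv_of_pos (by norm_num)
      have hmod2 : PySem.Int.mod k 2 = k % 2 :=
        PySem.Int.mod_eq_emod_of_pos (by norm_num)
      have hhalf : (k / 2).toNat < m := by omega
      have ih2 := ih ((k / 2).toNat) hhalf (k / 2) (by omega) rfl
      rw [hfd, ih2]
      set h' := (k / 2).toNat with hh'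
      have hs2 : (Srep h' % n * ((10:Int) ^ h' % n + 1)) % n = Srep (h' + h') % n := by
        have h1 : Srep h' % n * ((10:Int) ^ h' % n + 1) ≡ Srep h' * ((10:Int) ^ h' + 1) [ZMOD n] :=
          (modeq_emod (Srep h') n).mul ((modeq_emod ((10:Int) ^ h') n).add_right 1)
        have h2 : Srep h' * ((10:Int) ^ h' + 1) = Srep (h' + h') := by
          rw [Srep_add]; ring
        exact h2 ▸ h1
      have hp2 : ((10:Int) ^ h' % n * ((10:Int) ^ h' % n)) % n = (10:Int) ^ (h' + h') % n := by
        have h1 : (10:Int) ^ h' % n * ((10:Int) ^ h' % n) ≡ (10:Int) ^ h' * (10:Int) ^ h' [ZMOD n] :=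
          (modeq_emod ((10:Int) ^ h') n).mul (modeq_emod ((10:Int) ^ h') n)
        have h2 : (10:Int) ^ h' * (10:Int) ^ h' = (10:Int) ^ (h' + h') := by
          rw [pow_add]
        exact h2 ▸ h1
      by_cases hodd : k % 2 = 1
      · have hm : m = h' + h' + 1 := by omega
        rw [hmod2, if_pos hodd]
        simp only [mn, hs2, hp2, hm, Prod.mk.injEq]
        refine ⟨?_, ?_⟩
        · show (Srep (h' + h') % n * 10 + 1) % n = Srep (h' + h' + 1) % n
          have h1 : Srep (h' + h') % n * 10 + 1 ≡ Srep (h' + h') * 10 + 1 [ZMOD n] :=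
            ((modeq_emod (Srep (h' + h')) n).mul_right 10).add_right 1
          have h2 : Srep (h' + h') * 10 + 1 = Srep (h' + h' + 1) := by
            show _ = 10 * Srep (h' + h') + 1; ring
          exact h2 ▸ h1
        · show ((10:Int) ^ (h' + h') % n * 10) % n = (10:Int) ^ (h' + h' + 1) % n
          have h1 : (10:Int) ^ (h' + h') % n * 10 ≡ (10:Int) ^ (h' + h') * 10 [ZMOD n] :=
            (modeq_emod ((10:Int) ^ (h' + h')) n).mul_right 10
          have h2 : (10:Int) ^ (h' + h') * 10 = (10:Int) ^ (h' + h' + 1) := by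
            rw [pow_succ]
          exact h2 ▸ h1
      · have hm : m = h' + h' := by omega
        rw [hmod2, if_neg hodd]
        simp only [mn, hs2, hp2, hm]

-- the loop of A enumerates the powers of 10 mod n up to the first exponent L ≥ 1
-- with 10^L % n = 1
lemma pvLoopA_spec (n : Int) (hn : 2 ≤ n) (L : Nat) (_hL1 : 0 < L)
    (hLmod : (10:Int) ^ L % n = 1)
    (hmin : ∀ m, 0 < m → m < L → (10:Int) ^ m % n ≠ 1) :
    ∀ (fuel i : Nat), i < L → L ≤ i + fuel →
      pvLoopA n fuel ((10:Int) ^ i % n) ((List.range i).map (fun j => (10:Int) ^ j % n))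
        = (List.range L).map (fun j => (10:Int) ^ j % n) := by
  intro fuel
  induction fuel with
  | zero => intro i h1 h2; omega
  | succ fuel ihf =>
    intro i h1 h2
    have mn : ∀ x : Int, PySem.Int.mod x n = x % n :=
      fun x => PySem.Int.mod_eq_emod_of_pos (by omega)
    have happ : (List.range i).map (fun j => (10:Int) ^ j % n) ++ [(10:Int) ^ i % n]
        = (List.range (i + 1)).map (fun j => (10:Int) ^ j % n) := by
      rw [List.range_succ, List.map_append]; rfl
    have hrem : PySem.Int.mod (((10:Int) ^ i % n) * 10) n = (10:Int) ^ (i + 1) % n := by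
      rw [mn]
      have h1 : ((10:Int) ^ i % n) * 10 ≡ (10:Int) ^ i * 10 [ZMOD n] :=
        (modeq_emod ((10:Int) ^ i) n).mul_right 10
      have h2 : (10:Int) ^ i * 10 = (10:Int) ^ (i + 1) := by rw [pow_succ]
      exact h2 ▸ h1
    simp only [pvLoopA, happ, hrem]
    rcases eq_or_lt_of_le (show i + 1 ≤ L by omega) with heq | hlt
    · rw [if_pos (by rw [heq, hLmod]), heq]
    · rw [if_neg (hmin (i + 1) (by omega) hlt)]
      exact ihf (i + 1) hlt (by omega)

lemma exists_order (n : Int) (hn : 2 ≤ n) (h2 : ¬ (2:Int) ∣ n) (h5 : ¬ (5:Int) ∣ n) :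
    ∃ m, (0 < m ∧ (10:Int) ^ m % n = 1) ∧ m < n.toNat := by
  have hnN : ((n.toNat : Nat) : Int) = n := Int.toNat_of_nonneg (by omega)
  have hN : 2 ≤ n.toNat := by omega
  have cop : Nat.Coprime 10 n.toNat := by
    have h10 : (10:Nat) = 2 * 5 := by norm_num
    rw [h10, Nat.coprime_mul_iff_left]
    constructor <;> rw [Nat.Prime.coprime_iff_not_dvd (by norm_num)] <;> intro hd
    · exact h2 (by rw [← hnN]; exact_mod_cast Int.natCast_dvd_natCast.mpr hd)
    · exact h5 (by rw [← hnN]; exact_mod_cast Int.natCast_dvd_natCast.mpr hd)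
  have euler : (10:Nat) ^ Nat.totient n.toNat ≡ 1 [MOD n.toNat] := Nat.ModEq.pow_totient cop
  have hnat : (10:Nat) ^ Nat.totient n.toNat % n.toNat = 1 := by
    have h1 : (1:Nat) % n.toNat = 1 := Nat.mod_eq_of_lt (by omega)
    rw [Nat.ModEq, h1] at euler
    exact euler
  refine ⟨Nat.totient n.toNat, ⟨Nat.totient_pos.mpr (by omega), ?_⟩,
    by have := Nat.totient_lt n.toNat (by omega); omega⟩
  calc (10:Int) ^ Nat.totient n.toNat % n
      = (((10:Nat) ^ Nat.totient n.toNat % n.toNat : Nat) : Int) := by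
        rw [← hnN]; push_cast; rfl
    _ = 1 := by rw [hnat]; rfl

lemma Srep_period (n : Int) (L : Nat) (h10 : (10:Int) ^ L % n = 1) (hn : 2 ≤ n) :
    ∀ (q r : Nat), Srep (q * L + r) ≡ (q : Int) * Srep L + Srep r [ZMOD n] := by
  intro q r
  induction q with
  | zero => simp
  | succ q ih =>
    have he : (q + 1) * L + r = (q * L + r) + L := by ring
    have h1 : (10:Int) ^ L ≡ 1 [ZMOD n] := by
      show (10:Int) ^ L % n = 1 % n
      rw [h10, Int.emod_eq_of_lt (by norm_num) (by omega)]
    calc Srep ((q + 1) * L + r) = (10:Int) ^ L * Srep (q * L + r) + Srep L := by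
          rw [he, Srep_add]
      _ ≡ 1 * ((q : Int) * Srep L + Srep r) + Srep L [ZMOD n] := (h1.mul ih).add_right _
      _ = ((q : Nat) + 1 : Int) * Srep L + Srep r := by ring
      _ = (((q + 1 : Nat)) : Int) * Srep L + Srep r := by push_cast; ring

lemma sum_pows_mod (n : Int) (t : Nat) :
    ((List.range t).map (fun j => (10:Int) ^ j % n)).sum % n = Srep t % n := by
  conv_rhs => rw [Srep_eq_sum, List.sum_int_mod, List.map_map]
  rfl

-- ===== VERDICT (by name: the statement is the Claim_ definition above) =====
theorem repunit_modulus_py_spec : Claim_equal_repunit_modulus_py := by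
  intro repunit n _ hpre
  unfold Spec_repunit_modulus_py repunit_modulus_py repunit_modulus_py_alt
  by_cases hc : PySem.Int.mod n 2 = 0 ∨ PySem.Int.mod n 5 = 0
  · rw [if_pos hc, if_pos hc]
  · rw [if_neg hc, if_neg hc]
    push Not at hc
    have h2 : ¬ (2:Int) ∣ n := fun h => hc.1 ((PySem.Int.mod_eq_zero_iff_dvd n 2).mpr h)
    have h5 : ¬ (5:Int) ∣ n := fun h => hc.2 ((PySem.Int.mod_eq_zero_iff_dvd n 5).mpr h)
    have hpre' : 2 ≤ n ∧ 0 ≤ repunit := by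
      rcases hpre with h | h | h
      · exact absurd (Int.dvd_of_emod_eq_zero h) h2
      · exact absurd (Int.dvd_of_emod_eq_zero h) h5
      · exact h
    obtain ⟨hn2, hrep0⟩ := hpre'
    have mn : ∀ x : Int, PySem.Int.mod x n = x % n :=
      fun x => PySem.Int.mod_eq_emod_of_pos (by omega)
    obtain ⟨w, hw, hwlt⟩ := exists_order n hn2 h2 h5
    have hex : ∃ m, 0 < m ∧ (10:Int) ^ m % n = 1 := ⟨w, hw⟩
    set L := Nat.find hex with hLdef
    have hLprop : 0 < L ∧ (10:Int) ^ L % n = 1 := Nat.find_spec hex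
    have hmin : ∀ m, 0 < m → m < L → (10:Int) ^ m % n ≠ 1 := by
      intro m hm hmL h1
      exact Nat.find_min hex hmL ⟨hm, h1⟩
    have hLlt : L < n.toNat := lt_of_le_of_lt (Nat.find_min' hex hw) hwlt
    have hone : (1:Int) % n = 1 := Int.emod_eq_of_lt (by norm_num) (by omega)
    have hloop := pvLoopA_spec n hn2 L hLprop.1 hLprop.2 hmin n.toNat 0 hLprop.1 (by omega)
    simp only [List.range_zero, List.map_nil] at hloop
    have hrem : pvLoopA n n.toNat 1 [] = (List.range L).map (fun j => (10:Int) ^ j % n) := by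
      rw [show (1:Int) = (10:Int) ^ (0:Nat) % n by rw [pow_zero, hone]]
      exact hloop
    have hLpos : (0:Int) < (L:Int) := by exact_mod_cast hLprop.1
    have hq : PySem.Int.floordiv repunit (L:Int) = repunit / (L:Int) :=
      PySem.Int.floordiv_eq_ediv_of_pos hLpos
    have hr : PySem.Int.mod repunit (L:Int) = repunit % (L:Int) :=
      PySem.Int.mod_eq_emod_of_pos hLpos
    have hr0 : 0 ≤ repunit % (L:Int) := Int.emod_nonneg repunit (by omega)
    have hrlt : repunit % (L:Int) < (L:Int) := Int.emod_lt_of_pos repunit hLpos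
    have hq0 : 0 ≤ repunit / (L:Int) := Int.ediv_nonneg hrep0 (le_of_lt hLpos)
    simp only [hrem, List.length_map, List.length_range, hq, hr]
    rw [PySem.List.slice_to _ hr0]
    have htake : (((List.range L).map (fun j => (10:Int) ^ j % n)).take (repunit % (L:Int)).toNat)
        = (List.range ((repunit % (L:Int)).toNat)).map (fun j => (10:Int) ^ j % n) := by
      rw [← List.map_take, List.take_range, Nat.min_eq_left (by omega)]
    rw [htake, mn, pvGeoB_spec n hn2 repunit.toNat repunit hrep0 rfl]
    have hS1 : ((List.range L).map (fun j => (10:Int) ^ j % n)).sum ≡ Srep L [ZMOD n] :=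
      sum_pows_mod n L
    have hS2 : ((List.range ((repunit % (L:Int)).toNat)).map (fun j => (10:Int) ^ j % n)).sum
        ≡ Srep ((repunit % (L:Int)).toNat) [ZMOD n] :=
      sum_pows_mod n ((repunit % (L:Int)).toNat)
    have h1 : ((repunit / (L:Int)).toNat : Int) = repunit / (L:Int) := Int.toNat_of_nonneg hq0
    have h2' : ((repunit % (L:Int)).toNat : Int) = repunit % (L:Int) := Int.toNat_of_nonneg hr0
    have h3 : ((repunit.toNat : Nat) : Int) = repunit := Int.toNat_of_nonneg hrep0
    have hdecomp : repunit / (L:Int) * (L:Int) + repunit % (L:Int) = repunit := by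
      rw [mul_comm]; exact Int.mul_ediv_add_emod repunit (L:Int)
    have hNat : (repunit / (L:Int)).toNat * L + (repunit % (L:Int)).toNat = repunit.toNat := by
      have hcast : (((repunit / (L:Int)).toNat * L + (repunit % (L:Int)).toNat : Nat) : Int)
          = ((repunit.toNat : Nat) : Int) := by
        push_cast
        rw [h1, h2', h3]
        exact hdecomp
      exact_mod_cast hcast
    have hper := Srep_period n L hLprop.2 hn2 (repunit / (L:Int)).toNat (repunit % (L:Int)).toNat
    rw [hNat, h1] at hper
    have hX : ((List.range L).map (fun j => (10:Int) ^ j % n)).sum * (repunit / (L:Int))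
        + ((List.range ((repunit % (L:Int)).toNat)).map (fun j => (10:Int) ^ j % n)).sum
        ≡ repunit / (L:Int) * Srep L + Srep ((repunit % (L:Int)).toNat) [ZMOD n] := by
      have := (hS1.mul_right (repunit / (L:Int))).add hS2
      calc _ ≡ Srep L * (repunit / (L:Int)) + Srep ((repunit % (L:Int)).toNat) [ZMOD n] := this
        _ = repunit / (L:Int) * Srep L + Srep ((repunit % (L:Int)).toNat) := by ring
    exact hX.trans hper.symm
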